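-- pv_equiv track=rewrite | github.com/Mark-Mulligan/advent-of-code-2023 | day12/part1.py | get_base_combination
-- ===== SOURCE A (Python) =====
-- def get_base_combination(springs, sequence):
--     result = []
--     for i, item in enumerate(sequence):
--         for _ in range(item):
--             result.append('#')
--         if i < len(sequence) - 1:
--             result.append('.')
--
--     while len(result) < len(springs):
--         result.append('.')
--
--     return result
-- ===== SOURCE B (Python) =====
-- def get_base_combination(springs, sequence):
--     runs = [['#'] * item for item in sequence]
--     natural = (sum(len(r) for r in runs) + len(runs) - 1) if runs else 0
--     total = max(natural, len(springs))
--     result = ['.'] * total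
--     pos = 0
--     for run in runs:
--         result[pos:pos + len(run)] = run
--         pos += len(run) + 1
--     return result
-- ===== Notes on version B (the rewrite author's own statement) =====
-- stated objective: alternative
-- what changed: Instead of A's append-one-character loops with a separator branch plus a padding while-loop, B computes the final length up front, preallocates a list filled with '.', and writes each '#'-run into it by index arithmetic (slice assignment), the separator dots already being in place.
import Mathlib
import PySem

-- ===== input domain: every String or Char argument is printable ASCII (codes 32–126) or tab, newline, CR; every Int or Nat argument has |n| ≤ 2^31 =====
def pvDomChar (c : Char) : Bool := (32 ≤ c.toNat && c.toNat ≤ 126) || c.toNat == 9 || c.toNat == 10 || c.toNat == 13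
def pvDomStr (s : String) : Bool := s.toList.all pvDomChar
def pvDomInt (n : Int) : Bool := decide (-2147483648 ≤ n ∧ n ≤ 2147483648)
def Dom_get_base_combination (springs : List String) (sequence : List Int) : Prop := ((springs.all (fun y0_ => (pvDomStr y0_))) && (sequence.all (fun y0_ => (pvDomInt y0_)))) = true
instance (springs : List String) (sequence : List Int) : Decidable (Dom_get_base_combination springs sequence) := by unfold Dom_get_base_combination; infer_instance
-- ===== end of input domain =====

-- B computes the final length up front, preallocates a list of '.', and writes each '#'-run
-- into it by index arithmetic, instead of A's per-character appends with a separator branch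
-- and a padding while-loop; objective: alternative (same cost, different construction).

-- ===== PORT A =====
-- the trailing 'while len(result) < len(springs): result.append('.')' loop
def padWhileA (n : Nat) (result : List String) : List String :=
  if result.length < n then padWhileA n (result ++ ["."]) else result
termination_by n - result.length
decreasing_by simp_all; omega

def get_base_combination (springs : List String) (sequence : List Int) : List String :=
  let result : List String :=
    (PySem.List.enumerate sequence 0).foldl
      (fun result p =>
        let result := (PySem.List.pyRange 0 p.2 1).foldl (fun r _ => r ++ ["#"]) result
        if p.1 < (sequence.length : Int) - 1 then result ++ ["."] else result)
      []
  padWhileA springs.length result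

-- ===== PORT B =====
def get_base_combination_alt (springs : List String) (sequence : List Int) : List String :=
  let runs := sequence.map (fun item => List.replicate item.toNat '#')
  let natural : Nat := if runs.isEmpty then 0 else (runs.map List.length).sum + runs.length - 1
  let total := max natural springs.length
  -- 'result[pos:pos+len(run)] = run' ported as take/drop splice (equal-length, in-range slice)
  let final := runs.foldl
      (fun (st : List Char × Nat) run =>
        (st.1.take st.2 ++ run ++ st.1.drop (st.2 + run.length), st.2 + run.length + 1))
      (List.replicate total '.', 0)
  final.1.map Char.toString

-- ===== PRECONDITION & SPEC =====
def Spec_get_base_combination (springs : List String) (sequence : List Int) (out : List String) : Prop := out = get_base_combination_alt springs sequence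
instance (springs : List String) (sequence : List Int) (out : List String) : Decidable (Spec_get_base_combination springs sequence out) := by unfold Spec_get_base_combination; infer_instance

-- ===== CLAIM (what is proved, stated in full; the proofs are below) =====
def Claim_equal_get_base_combination : Prop := ∀ (springs : List String) (sequence : List Int), Dom_get_base_combination springs sequence → Spec_get_base_combination springs sequence (get_base_combination springs sequence)

-- ===== LEMMAS AND PROOFS =====

theorem hashSingleton : String.singleton '#' = "#" := rfl
theorem dotSingleton : String.singleton '.' = "." := rfl

-- the groups of A's output joined by single dots ('.' between consecutive groups)
def joinDots : List (List Char) → List Char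
  | [] => []
  | [g] => g
  | g :: rest => g ++ '.' :: joinDots rest

-- each remaining group preceded by its separator dot
def prejoin (l : List (List Char)) : List Char :=
  (l.map (fun r => '.' :: r)).flatten

theorem prejoin_cons (r : List Char) (l : List (List Char)) :
    prejoin (r :: l) = '.' :: (r ++ prejoin l) := by simp [prejoin]

theorem joinDots_cons (g : List Char) (l : List (List Char)) :
    joinDots (g :: l) = g ++ prejoin l := by
  induction l generalizing g with
  | nil => simp [joinDots, prejoin]
  | cons y ys ih => rw [joinDots, prejoin_cons, ih y]; simp

theorem prejoin_length (l : List (List Char)) :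
    (prejoin l).length = (l.map List.length).sum + l.length := by
  induction l with
  | nil => simp [prejoin]
  | cons r rs ih => rw [prejoin_cons]; simp [ih]; omega

-- A's padding while-loop appends exactly the missing dots
theorem padWhileA_eq (n : Nat) (result : List String) :
    padWhileA n result = result ++ List.replicate (n - result.length) "." := by
  by_cases h : result.length < n
  · rw [padWhileA, if_pos h, padWhileA_eq n (result ++ ["."])]
    have : n - result.length = (n - (result.length + 1)) + 1 := by omega
    rw [this, List.replicate_succ]
    simp
  · rw [padWhileA, if_neg h]
    have : n - result.length = 0 := by omega
    simp [this]
termination_by n - result.length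
decreasing_by simp_all; omega

-- A's inner for-loop appends item.toNat hashes
theorem innerA_eq (l : List Int) (acc : List String) :
    l.foldl (fun r _ => r ++ ["#"]) acc = acc ++ List.replicate l.length "#" := by
  induction l generalizing acc with
  | nil => simp
  | cons x xs ih => simp [ih, List.replicate_succ]

-- A's main fold equals the chars of the dot-joined groups, mapped to one-char strings
theorem foldA_eq (N : Int) (xs : List Int) (s : Int) (acc : List String)
    (h : s + xs.length = N) :
    (PySem.List.enumerate xs s).foldl
      (fun result p =>
        let result := (PySem.List.pyRange 0 p.2 1).foldl (fun r _ => r ++ ["#"]) result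
        if p.1 < N - 1 then result ++ ["."] else result)
      acc
    = acc ++ (joinDots (xs.map (fun item => List.replicate item.toNat '#'))).map Char.toString := by
  induction xs generalizing s acc with
  | nil => simp [PySem.List.enumerate_nil, joinDots]
  | cons x rest ih =>
    rw [PySem.List.enumerate_cons]
    simp only [List.foldl_cons]
    rw [innerA_eq]
    have hlen : (PySem.List.pyRange 0 x 1).length = x.toNat := by
      simp [PySem.List.length_pyRange_one 0 x]
    cases rest with
    | nil =>
      have hs : ¬ (s < N - 1) := by simp at h; omega
      simp only [hlen]
      rw [if_neg hs]
      rw [ih (s + 1) _ (by simp at h ⊢; omega)]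
      simp [joinDots, List.map_replicate, hashSingleton]
    | cons y ys =>
      have hs : s < N - 1 := by simp at h; omega
      simp only [hlen]
      rw [if_pos hs]
      rw [ih (s + 1) _ (by simp at h ⊢; omega)]
      show acc ++ List.replicate x.toNat "#" ++ ["."] ++ _ = _
      simp [joinDots, List.map_replicate, hashSingleton, dotSingleton]

-- B's placement loop, once the first group has been written: each step keeps the shape
-- 'written prefix ++ remaining dots' with pos one past the prefix (skipping the separator dot).
theorem foldB_suffix (rs : List (List Char)) (X : List Char) (k : Nat)
    (hk : (prejoin rs).length ≤ k) :
    rs.foldl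
      (fun (st : List Char × Nat) run =>
        (st.1.take st.2 ++ run ++ st.1.drop (st.2 + run.length), st.2 + run.length + 1))
      (X ++ List.replicate k '.', X.length + 1)
    = (X ++ prejoin rs ++ List.replicate (k - (prejoin rs).length) '.',
       X.length + 1 + (prejoin rs).length) := by
  induction rs generalizing X k with
  | nil => simp [prejoin]
  | cons r rest ih =>
    have hk1 : 1 + r.length + (prejoin rest).length ≤ k := by
      rw [prejoin_cons] at hk; simp at hk; omega
    simp only [List.foldl_cons]
    have htake : (X ++ List.replicate k '.').take (X.length + 1) = X ++ ['.'] := by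
      rw [List.take_append, List.take_of_length_le (by omega),
          List.take_replicate]
      have h1 : X.length + 1 - X.length = 1 := by omega
      have h2 : min 1 k = 1 := by omega
      rw [h1, h2, List.replicate_one]
    have hdrop : (X ++ List.replicate k '.').drop (X.length + 1 + r.length)
        = List.replicate (k - (1 + r.length)) '.' := by
      rw [List.drop_append, List.drop_of_length_le (by omega),
          List.drop_replicate]
      have : X.length + 1 + r.length - X.length = 1 + r.length := by omega
      rw [this]; simp
    rw [htake, hdrop]
    have hshape : (X ++ ['.']) ++ r ++ List.replicate (k - (1 + r.length)) '.'
        = (X ++ '.' :: r) ++ List.replicate (k - (1 + r.length)) '.' := by simp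
    rw [hshape]
    have hpos : X.length + 1 + r.length + 1 = (X ++ '.' :: r).length + 1 := by simp; omega
    rw [hpos, ih (X ++ '.' :: r) (k - (1 + r.length)) (by omega)]
    have hrep : k - (1 + r.length) - ((rest.map List.length).sum + rest.length)
        = k - (prejoin (r :: rest)).length := by
      rw [prejoin_cons]; simp [prejoin_length]; omega
    rw [prejoin_length, hrep, prejoin_cons]
    refine Prod.ext ?_ ?_
    · simp
    · simp [prejoin_length]; omega

-- B's whole placement loop, from the preallocated all-dots list
theorem foldB_all (r0 : List Char) (rs : List (List Char)) (total : Nat)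
    (h : r0.length + (prejoin rs).length ≤ total) :
    (r0 :: rs).foldl
      (fun (st : List Char × Nat) run =>
        (st.1.take st.2 ++ run ++ st.1.drop (st.2 + run.length), st.2 + run.length + 1))
      (List.replicate total '.', 0)
    = (joinDots (r0 :: rs) ++ List.replicate (total - (joinDots (r0 :: rs)).length) '.',
       (joinDots (r0 :: rs)).length + 1) := by
  simp only [List.foldl_cons, List.take_zero, List.nil_append, Nat.zero_add,
    List.drop_replicate]
  rw [foldB_suffix rs r0 (total - r0.length) (by omega)]
  rw [joinDots_cons]
  refine Prod.ext ?_ ?_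
  · simp; omega
  · simp; omega

-- ===== VERDICT (by name: the statement is the Claim_ definition above) =====
theorem get_base_combination_spec : Claim_equal_get_base_combination := by
  intro springs sequence _
  unfold Spec_get_base_combination get_base_combination get_base_combination_alt
  rw [foldA_eq (sequence.length : Int) sequence 0 [] (by simp)]
  rw [padWhileA_eq]
  cases sequence with
  | nil =>
      simp [joinDots, List.map_replicate, dotSingleton]
  | cons a as =>
      simp only [List.map_cons, List.isEmpty_cons, Bool.false_eq_true, if_false]
      rw [foldB_all _ _ _ (by simp [prejoin_length]; omega)]
      simp only [List.nil_append, List.map_append, List.map_replicate,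
        List.length_map]
      congr 2
      rw [joinDots_cons]
      simp [prejoin_length]
      omega
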